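-- pv_equiv track=rewrite | github.com/zmrdltl/problemSolving | programmers/코딩 기초 트레이닝/수 조작하기 1.py | solution
-- ===== SOURCE A (Python) =====
-- def solution(n, control):
--     answer = n
--     for op in control:
--         if op == 'w':
--             answer += 1
--         elif op == 's':
--             answer -= 1
--         elif op == 'd':
--             answer += 10
--         else:
--             answer -= 10
--     return answer
-- ===== SOURCE B (Python) =====
-- def solution(n, control):
--     w = control.count('w')
--     s = control.count('s')
--     d = control.count('d')
--     rest = len(control) - w - s - d
--     return n + w - s + 10 * d - 10 * rest
-- ===== Notes on version B (the rewrite author's own statement) =====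
-- stated objective: faster
-- what changed: Replaced the per-character accumulating loop with closed-form arithmetic over character counts: count 'w', 's', 'd' via str.count, derive the else-bucket as len minus those, and combine once.
import Mathlib
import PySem

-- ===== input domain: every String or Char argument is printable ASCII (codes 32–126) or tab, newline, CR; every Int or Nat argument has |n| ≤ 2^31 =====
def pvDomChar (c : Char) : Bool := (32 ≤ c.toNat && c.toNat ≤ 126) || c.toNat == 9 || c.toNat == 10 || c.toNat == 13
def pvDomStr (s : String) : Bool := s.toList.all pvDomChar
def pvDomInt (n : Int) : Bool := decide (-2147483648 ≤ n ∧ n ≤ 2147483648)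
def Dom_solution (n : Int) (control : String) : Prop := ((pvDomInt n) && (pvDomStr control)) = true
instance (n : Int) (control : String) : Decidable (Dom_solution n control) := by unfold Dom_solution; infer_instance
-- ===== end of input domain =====

-- B replaces A's per-character accumulating loop with closed-form arithmetic over character counts (constant-factor faster in a timing run: C-level str.count scans vs a Python per-char loop).

-- ===== PORT A =====
def solution (n : Int) (control : String) : Int :=
  control.toList.foldl
    (fun answer op =>
      if op == 'w' then answer + 1
      else if op == 's' then answer - 1
      else if op == 'd' then answer + 10
      else answer - 10) n

-- ===== PORT B =====
def solution_alt (n : Int) (control : String) : Int :=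
  let w : Int := PySem.Str.count control "w"
  let s : Int := PySem.Str.count control "s"
  let d : Int := PySem.Str.count control "d"
  let rest : Int := PySem.Str.len control - w - s - d
  n + w - s + 10 * d - 10 * rest

-- ===== PRECONDITION & SPEC =====
def Spec_solution (n : Int) (control : String) (out : Int) : Prop := out = solution_alt n control
instance (n : Int) (control : String) (out : Int) : Decidable (Spec_solution n control out) := by unfold Spec_solution; infer_instance

-- ===== CLAIM (what is proved, stated in full; the proofs are below) =====
def Claim_equal_solution : Prop := ∀ (n : Int) (control : String), Dom_solution n control → Spec_solution n control (solution n control)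

-- ===== LEMMAS AND PROOFS =====
theorem count_go_single (c : Char) (l : List Char) (fuel acc : Nat) (h : l.length ≤ fuel) :
    PySem.Chars.count.go [c] fuel l acc = acc + l.count c := by
  induction l generalizing fuel acc with
  | nil => cases fuel <;> simp [PySem.Chars.count.go]
  | cons hd t ih =>
    cases fuel with
    | zero => simp at h
    | succ f =>
      simp only [List.length_cons, Nat.succ_le_succ_iff] at h
      rw [PySem.Chars.count.go]
      by_cases hc : hd = c
      · simp [hc, List.isPrefixOf, ih _ _ h]
        omega
      · simp [List.isPrefixOf, Ne.symm hc, hc, ih _ _ h]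

theorem count_single (c : Char) (l : List Char) :
    PySem.Chars.count l [c] = l.count c := by
  simp [PySem.Chars.count, count_go_single c l l.length 0 le_rfl]

theorem solution_foldl_count (l : List Char) (n : Int) :
    l.foldl
      (fun answer op =>
        if op == 'w' then answer + 1
        else if op == 's' then answer - 1
        else if op == 'd' then answer + 10
        else answer - 10) n
    = n + (l.count 'w' : Int) - (l.count 's' : Int) + 10 * (l.count 'd' : Int)
      - 10 * ((l.length : Int) - (l.count 'w' : Int) - (l.count 's' : Int) - (l.count 'd' : Int)) := by
  induction l generalizing n with
  | nil => simp
  | cons c cs ih =>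
    simp only [List.foldl_cons, List.count_cons, List.length_cons, ih]
    by_cases hw : c = 'w' <;> by_cases hs : c = 's' <;> by_cases hd : c = 'd' <;>
      simp_all <;> ring

-- ===== VERDICT (by name: the statement is the Claim_ definition above) =====
theorem solution_spec : Claim_equal_solution := by
  intro n control _
  unfold Spec_solution solution solution_alt
  rw [solution_foldl_count]
  simp [PySem.Str.count_eq, PySem.Str.len_eq, count_single]
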